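-- pv_equiv track=rewrite | github.com/sustrik/uxy | base.py | decode_field
-- ===== SOURCE A (Python) =====
-- import unicodedata
--
-- ESCAPE_SEQUENCES1 = {
--   't':  '\t',
--   'n':  '\n',
--   '"':  '"',
--   '\\': '\\',
-- }
--
-- def decode_field(s):
--   # Replace control characters by question marks.
--   s = "".join((c if unicodedata.category(c)[0] != "C" else '?') for c in s)
--   if not (s.startswith('"') and s.endswith('"')):
--     return s
--   # Quoted field.
--   s = s[1:-1]
--   # Expand escape sequences.
--   f = ""
--   j = 0
--   while j < len(s):
--     if s[j] == '\\':
--       if j + 1 >= len(s):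
--         f += "?"
--         j += 1;
--         continue
--       if s[j + 1] not in ESCAPE_SEQUENCES1:
--         f += "?"
--         j += 2
--         continue
--       f += ESCAPE_SEQUENCES1[s[j + 1]]
--       j += 2
--       continue
--     f += s[j]
--     j += 1
--   return f
-- ===== SOURCE B (Python) =====
-- import re
-- import unicodedata
--
-- ESCAPE_SEQUENCES1 = {
--   't':  '\t',
--   'n':  '\n',
--   '"':  '"',
--   '\\': '\\',
-- }
--
-- def decode_field(s):
--   # Replace control characters by question marks.
--   s = "".join((c if unicodedata.category(c)[0] != "C" else '?') for c in s)
--   if not (s.startswith('"') and s.endswith('"')):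
--     return s
--   # Quoted field: one table-driven regex substitution expands every escape.
--   # \\(.?) consumes backslash + following char as one non-overlapping unit;
--   # the optional group makes a trailing lone backslash match with group '' -> '?'.
--   return re.sub(r'\\(.?)',
--                 lambda m: ESCAPE_SEQUENCES1.get(m.group(1), '?'),
--                 s[1:-1], flags=re.DOTALL)
-- ===== Notes on version B (the rewrite author's own statement) =====
-- stated objective: idiomatic
-- what changed: The hand-written index-stepping while loop (an explicit state machine advancing j by 1 or 2 with a membership test plus a separate dict lookup) is replaced by a single table-driven regex substitution whose replacement function resolves each escape pair via dict.get with a question-mark default, the optional group covering the trailing lone backslash.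
import Mathlib
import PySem

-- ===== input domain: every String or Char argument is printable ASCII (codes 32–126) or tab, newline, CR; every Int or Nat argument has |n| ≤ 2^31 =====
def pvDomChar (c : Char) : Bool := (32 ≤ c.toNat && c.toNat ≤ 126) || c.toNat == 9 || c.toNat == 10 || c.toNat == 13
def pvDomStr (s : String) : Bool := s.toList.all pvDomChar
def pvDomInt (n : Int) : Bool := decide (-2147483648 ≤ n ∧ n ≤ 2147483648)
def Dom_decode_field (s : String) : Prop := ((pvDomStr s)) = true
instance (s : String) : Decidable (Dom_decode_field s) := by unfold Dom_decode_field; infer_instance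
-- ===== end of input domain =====

-- B replaces A's index-stepping while-loop escape expander by one table-driven
-- regex substitution re.sub(r'\\(.?)', ...) with a dict.get default (idiomatic; same cost).

-- ===== PORT A =====
-- unicodedata.category(c)[0] == "C" : exact on the ASCII domain (codes < 32 and 127 are Cc)
def aCtrl (c : Char) : Char := if c.toNat < 32 ∨ c.toNat = 127 then '?' else c

def ESCAPE_SEQUENCES1 : PySem.Dict Char Char :=
  PySem.Dict.ofList [('t', '\t'), ('n', '\n'), ('"', '"'), ('\\', '\\')]

-- the while loop: f accumulator, index j stepped by 1 or 2
def aLoop (s : List Char) (f : List Char) (j : Nat) : List Char :=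
  if h : j < s.length then
    if s[j] = '\\' then
      if hl : s.length ≤ j + 1 then
        aLoop s (f ++ ['?']) (j + 1)
      else
        match (ESCAPE_SEQUENCES1.get? (s[j + 1]'(by omega))) with
        | none => aLoop s (f ++ ['?']) (j + 2)
        | some c => aLoop s (f ++ [c]) (j + 2)
    else aLoop s (f ++ [s[j]]) (j + 1)
  else f
termination_by s.length - j

def decode_field (s : String) : String :=
  let l := s.toList.map aCtrl
  if l.head? = some '"' ∧ l.getLast? = some '"' then
    String.mk (aLoop (PySem.List.slice l (some 1) (some (-1))) [] 0)
  else String.mk l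

-- ===== PORT B =====
def bCtrl (c : Char) : Char := if c.toNat < 32 ∨ c.toNat = 127 then '?' else c

def bEsc : PySem.Dict Char Char :=
  PySem.Dict.ofList [('t', '\t'), ('n', '\n'), ('"', '"'), ('\\', '\\')]

-- the replacement function: ESCAPE_SEQUENCES1.get(m.group(1), '?');
-- group(1) of \\(.?) is one char, or none when the optional group matched empty
def bRepl : Option Char → Char
  | none => '?'
  | some d => bEsc.getD d '?'

-- re.sub(r'\\(.?)', repl, s, DOTALL): re.sub's left-to-right non-overlapping scan,
-- ported by hand: a literal-backslash match consumes '\' plus the optional-group char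
def reSub : List Char → List Char
  | [] => []
  | c :: cs =>
    if c = '\\' then
      match cs with
      | [] => [bRepl none]
      | d :: ds => bRepl (some d) :: reSub ds
    else c :: reSub cs

def decode_field_alt (s : String) : String :=
  let l := s.toList.map bCtrl
  if l.head? = some '"' ∧ l.getLast? = some '"' then
    String.mk (reSub (PySem.List.slice l (some 1) (some (-1))))
  else String.mk l

-- ===== PRECONDITION & SPEC =====
def Spec_decode_field (s : String) (out : String) : Prop := out = decode_field_alt s
instance (s : String) (out : String) : Decidable (Spec_decode_field s out) := by unfold Spec_decode_field; infer_instance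

-- ===== CLAIM =====
def Claim_equal_decode_field : Prop := ∀ (s : String), Dom_decode_field s → Spec_decode_field s (decode_field s)

-- ===== LEMMAS AND PROOFS =====
lemma reSub_cons (c : Char) (cs : List Char) (h : ¬ c = '\\') : reSub (c :: cs) = c :: reSub cs := by
  rw [reSub.eq_def]; simp [h]

lemma reSub_esc (d : Char) (ds : List Char) : reSub ('\\' :: d :: ds) = bRepl (some d) :: reSub ds := by
  rw [reSub.eq_def]; simp

lemma aLoop_eq_reSub (s : List Char) (f : List Char) (j : Nat) :
    aLoop s f j = f ++ reSub (s.drop j) := by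
  by_cases h : j < s.length
  · rw [List.drop_eq_getElem_cons h]
    by_cases hb : s[j] = '\\'
    · by_cases hl : s.length ≤ j + 1
      · have hnil : s.drop (j + 1) = [] := List.drop_eq_nil_of_le hl
        rw [aLoop, dif_pos h, if_pos hb, dif_pos hl, aLoop_eq_reSub, hnil, hb]
        simp [reSub, bRepl]
      · have hj1 : j + 1 < s.length := by omega
        rw [List.drop_eq_getElem_cons hj1, aLoop, dif_pos h, if_pos hb, dif_neg hl]
        have hgetD : bRepl (some (s[j + 1])) = (ESCAPE_SEQUENCES1.get? (s[j + 1])).getD '?' := by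
          show bEsc.getD _ _ = _
          rw [PySem.Dict.getD_eq_get?_getD]; rfl
        cases hg : ESCAPE_SEQUENCES1.get? (s[j + 1]'hj1) with
        | none =>
          dsimp only
          rw [aLoop_eq_reSub s (f ++ ['?']) (j + 2), hb, reSub_esc]
          simp [hgetD, hg]
        | some c =>
          dsimp only
          rw [aLoop_eq_reSub s (f ++ [c]) (j + 2), hb, reSub_esc]
          simp [hgetD, hg]
    · rw [aLoop, dif_pos h, if_neg hb, aLoop_eq_reSub s (f ++ [s[j]]) (j + 1), reSub_cons _ _ hb]
      simp
  · rw [aLoop, dif_neg h]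
    simp [List.drop_eq_nil_of_le (by omega : s.length ≤ j), reSub]
termination_by s.length - j

-- ===== VERDICT =====
theorem decode_field_spec : Claim_equal_decode_field := by
  intro s _
  unfold Spec_decode_field decode_field decode_field_alt
  have hcb : bCtrl = aCtrl := rfl
  rw [hcb]
  by_cases h : (s.toList.map aCtrl).head? = some '"' ∧ (s.toList.map aCtrl).getLast? = some '"'
  · rw [if_pos h, if_pos h, aLoop_eq_reSub]
    simp
  · rw [if_neg h, if_neg h]
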